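-- pv_equiv track=rewrite | github.com/Snaptraks/SnapCogs | src/snapcogs/Fun/fun.py | _mock_text
-- ===== SOURCE A (Python) =====
-- def _mock_text(text: str) -> str:
--     mocked_text: list[str] = []
--
--     offset: int = 0
--     for i, char in enumerate(text):
--         if not char.isalpha():
--             offset += 1
--
--         if (i + offset) % 2:
--             mocked_text.append(char.lower())
--
--         else:
--             mocked_text.append(char.upper())
--
--     return "".join(mocked_text)
-- ===== SOURCE B (Python) =====
-- def _mock_text(text: str) -> str:
--     out: list[str] = []
--     upper = True
--     for char in text:
--         if char.isalpha():
--             out.append(char.upper() if upper else char.lower())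
--             upper = not upper
--         else:
--             out.append(char)
--     return "".join(out)
-- ===== Notes on version B (the rewrite author's own statement) =====
-- stated objective: simpler
-- what changed: Replaces the enumerate index plus non-alpha offset counter and (i+offset)%2 arithmetic with a single case-toggle boolean flipped only on alphabetic characters, passing non-alpha characters through verbatim.
import Mathlib
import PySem

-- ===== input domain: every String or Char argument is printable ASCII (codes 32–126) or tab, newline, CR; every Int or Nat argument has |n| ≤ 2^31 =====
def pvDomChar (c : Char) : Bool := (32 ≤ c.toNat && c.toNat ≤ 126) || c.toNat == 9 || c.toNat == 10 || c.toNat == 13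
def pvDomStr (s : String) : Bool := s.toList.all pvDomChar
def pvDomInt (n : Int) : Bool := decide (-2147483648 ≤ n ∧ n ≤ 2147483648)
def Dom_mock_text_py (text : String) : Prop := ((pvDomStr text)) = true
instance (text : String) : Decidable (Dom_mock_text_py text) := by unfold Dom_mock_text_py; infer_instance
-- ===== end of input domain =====

-- B replaces A's index+offset parity arithmetic with a case-toggle boolean flipped only on
-- alphabetic characters (objective: simpler); return values are proved identical.

-- ===== PORT A =====
-- one loop step of A: state is (offset, mocked_text)
def pvAStep (st : Int × List Char) (ic : Int × Char) : Int × List Char :=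
  let offset := if ¬ (PySem.Chars.isalpha ic.2 = true) then st.1 + 1 else st.1
  if PySem.Int.mod (ic.1 + offset) 2 ≠ 0 then
    (offset, st.2 ++ [PySem.Chars.lowerChar ic.2])
  else
    (offset, st.2 ++ [PySem.Chars.upperChar ic.2])

def mock_text_py (text : String) : String :=
  String.ofList ((PySem.List.enumerate text.toList 0).foldl pvAStep (0, [])).2

-- ===== PORT B =====
-- B's loop: toggle `upper` only on alphabetic characters, pass others through
def pvBGo : List Char → Bool → List Char
  | [], _ => []
  | c :: cs, upper =>
    if PySem.Chars.isalpha c then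
      (if upper then PySem.Chars.upperChar c else PySem.Chars.lowerChar c) :: pvBGo cs (!upper)
    else
      c :: pvBGo cs upper

def mock_text_py_alt (text : String) : String :=
  String.ofList (pvBGo text.toList true)

-- ===== PRECONDITION & SPEC =====
def Spec_mock_text_py (text : String) (out : String) : Prop := out = mock_text_py_alt text
instance (text : String) (out : String) : Decidable (Spec_mock_text_py text out) := by unfold Spec_mock_text_py; infer_instance

-- ===== CLAIM (what is proved, stated in full; the proofs are below) =====
def Claim_equal_mock_text_py : Prop := ∀ (text : String), Dom_mock_text_py text → Spec_mock_text_py text (mock_text_py text)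

-- ===== LEMMAS AND PROOFS =====

-- non-alpha characters are fixed by both case maps
lemma pv_lower_nonalpha (c : Char) (h : PySem.Chars.isalpha c = false) :
    PySem.Chars.lowerChar c = c := by
  simp [PySem.Chars.isalpha] at h
  simp [PySem.Chars.lowerChar, h.1]

lemma pv_upper_nonalpha (c : Char) (h : PySem.Chars.isalpha c = false) :
    PySem.Chars.upperChar c = c := by
  simp [PySem.Chars.isalpha] at h
  simp [PySem.Chars.upperChar, h.2]

-- loop invariant: A's fold from state (offset, acc) at index i produces acc ++ B's output,
-- with B's toggle equal to A's parity bit (i + offset) % 2 == 0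
lemma pv_loop (cs : List Char) (i offset : Int) (acc : List Char) :
    ((PySem.List.enumerate cs i).foldl pvAStep (offset, acc)).2
      = acc ++ pvBGo cs (PySem.Int.mod (i + offset) 2 == 0) := by
  induction cs generalizing i offset acc with
  | nil => simp [PySem.List.enumerate, pvBGo]
  | cons c cs ih =>
    rw [PySem.List.enumerate_cons, List.foldl_cons]
    by_cases ha : PySem.Chars.isalpha c = true
    · rcases Int.emod_two_eq_zero_or_one (i + offset) with hp | hp
      · have h2 : (i + 1 + offset) % 2 = 1 := by omega
        simp [pvAStep, ha, hp, ih, pvBGo, h2]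
      · have h2 : (i + 1 + offset) % 2 = 0 := by omega
        simp [pvAStep, ha, hp, ih, pvBGo, h2]
    · have ha' : PySem.Chars.isalpha c = false := by simpa using ha
      have hp : (i + 1 + (offset + 1)) % 2 = (i + offset) % 2 := by omega
      simp [pvAStep, ha', ih, pvBGo, hp,
        pv_lower_nonalpha c ha', pv_upper_nonalpha c ha']

-- ===== VERDICT (by name: the statement is the Claim_ definition above) =====
theorem mock_text_py_spec : Claim_equal_mock_text_py := by
  intro text _
  unfold Spec_mock_text_py mock_text_py mock_text_py_alt
  rw [pv_loop]
  norm_num [PySem.Int.mod]
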